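-- pv_equiv track=rewrite | github.com/labdb3/prophet-backend | model/sum/sum_partition.py | get_GM_input
-- ===== SOURCE A (Python) =====
-- def get_GM_input(min_partition):
--     GM_input = []
--     prev = 0
--     for i in range(0, len(min_partition)):
--         curr = []
--         for j in range(0, len(min_partition[i])):
--             curr.append([min_partition[i][j][0], min_partition[i][j][1] - prev])
--             prev = min_partition[i][j][1]
--         GM_input.append(curr)
--     return GM_input
-- ===== SOURCE B (Python) =====
-- def get_GM_input(min_partition):
--     # Phase 1: flatten all elements in order.
--     flat = [e for row in min_partition for e in row]
--     # Phase 2: one zip pass producing the flat output with global running differences.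
--     bs = [e[1] for e in flat]
--     flat_out = [[e[0], b - a] for e, a, b in zip(flat, [0] + bs, bs)]
--     # Phase 3: chunk the flat output back into the original row lengths.
--     out = []
--     i = 0
--     for row in min_partition:
--         out.append(flat_out[i:i + len(row)])
--         i += len(row)
--     return out
-- ===== Notes on version B (the rewrite author's own statement) =====
-- stated objective: alternative
-- what changed: Replaces A's single stateful double loop threading prev with three staged passes: flatten all elements, compute the global adjacent differences in one zip pass over the flat list, then chunk the flat output back into the original row lengths by slicing.
import Mathlib
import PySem

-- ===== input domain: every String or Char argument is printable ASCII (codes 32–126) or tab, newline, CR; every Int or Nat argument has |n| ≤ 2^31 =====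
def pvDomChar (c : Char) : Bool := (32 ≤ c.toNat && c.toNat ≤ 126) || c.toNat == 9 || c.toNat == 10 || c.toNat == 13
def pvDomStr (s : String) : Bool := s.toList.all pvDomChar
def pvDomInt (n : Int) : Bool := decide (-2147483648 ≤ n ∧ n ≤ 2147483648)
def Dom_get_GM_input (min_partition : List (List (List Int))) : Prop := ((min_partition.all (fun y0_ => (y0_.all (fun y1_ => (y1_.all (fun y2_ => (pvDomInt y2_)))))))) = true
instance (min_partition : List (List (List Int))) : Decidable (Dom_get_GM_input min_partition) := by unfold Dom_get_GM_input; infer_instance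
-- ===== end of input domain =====

-- B replaces A's single stateful double loop with three staged passes: flatten, one zip pass
-- of global adjacent differences over the flat list, then chunk back by row lengths.

-- ===== PORT A =====
-- inner 'for j' loop: builds curr and threads prev; e[0]/e[1] are in range under Pre_
-- (every inner list has length ≥ 2), so pyGetD's default is never used inside Pre_.
def rowA (row : List (List Int)) (prev : Int) : List (List Int) × Int :=
  match row with
  | [] => ([], prev)
  | e :: es =>
    let v := PySem.List.pyGetD e 1 0
    let r := rowA es v
    ([PySem.List.pyGetD e 0 0, v - prev] :: r.1, r.2)

-- outer 'for i' loop over the rows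
def loopA (rows : List (List (List Int))) (prev : Int) : List (List (List Int)) :=
  match rows with
  | [] => []
  | r :: rs =>
    let c := rowA r prev
    c.1 :: loopA rs c.2

def get_GM_input (min_partition : List (List (List Int))) : List (List (List Int)) :=
  loopA min_partition 0

-- ===== PORT B =====
-- Phase 3: out.append(flat_out[i:i+len(row)]); i += len(row)  — successive slices of flat_out
def chunkRows (rows : List (List (List Int))) (fo : List (List Int)) : List (List (List Int)) :=
  match rows with
  | [] => []
  | r :: rs => fo.take r.length :: chunkRows rs (fo.drop r.length)

def get_GM_input_alt (min_partition : List (List (List Int))) : List (List (List Int)) :=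
  let flat := min_partition.flatMap (fun row => row)
  let bs := flat.map (fun e => PySem.List.pyGetD e 1 0)
  let flat_out := ((flat.zip ((0 :: bs).zip bs)).map
    (fun p => [PySem.List.pyGetD p.1 0 0, p.2.2 - p.2.1]))
  chunkRows min_partition flat_out

-- ===== PRECONDITION & SPEC =====
-- Pre_ excludes exactly the inputs where Python A raises IndexError (an inner element
-- shorter than 2, so e[0] or e[1] fails); B raises there as well.
def Pre_get_GM_input (min_partition : List (List (List Int))) : Prop :=
  ∀ row ∈ min_partition, ∀ e ∈ row, 2 ≤ e.length
instance (min_partition : List (List (List Int))) : Decidable (Pre_get_GM_input min_partition) := by unfold Pre_get_GM_input; infer_instance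

def pvWitness_get_GM_input : List (List (List Int)) := [[[1, 2], [3, 5]], [[4, 9]]]

def Spec_get_GM_input (min_partition : List (List (List Int))) (out : List (List (List Int))) : Prop := out = get_GM_input_alt min_partition
instance (min_partition : List (List (List Int))) (out : List (List (List Int))) : Decidable (Spec_get_GM_input min_partition out) := by unfold Spec_get_GM_input; infer_instance

-- ===== CLAIM (what is proved, stated in full; the proofs are below) =====
def Claim_equal_get_GM_input : Prop := ∀ (min_partition : List (List (List Int))), Dom_get_GM_input min_partition → Pre_get_GM_input min_partition → Spec_get_GM_input min_partition (get_GM_input min_partition)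

-- ===== LEMMAS AND PROOFS =====

-- recursive characterisation of B's flat zip pass, threading the previous boundary pv
def flatF (flat : List (List Int)) (pv : Int) : List (List Int) :=
  match flat with
  | [] => []
  | e :: es =>
    let v := PySem.List.pyGetD e 1 0
    [PySem.List.pyGetD e 0 0, v - pv] :: flatF es v

theorem zipmap_eq_flatF (flat : List (List Int)) (pv : Int) :
    ((flat.zip ((pv :: flat.map (fun e => PySem.List.pyGetD e 1 0)).zip
        (flat.map (fun e => PySem.List.pyGetD e 1 0)))).map
      (fun p => [PySem.List.pyGetD p.1 0 0, p.2.2 - p.2.1]))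
      = flatF flat pv := by
  induction flat generalizing pv with
  | nil => simp [flatF]
  | cons e es ih => simp [flatF, ih]

theorem flatF_append (r rest : List (List Int)) (pv : Int) :
    flatF (r ++ rest) pv = (rowA r pv).1 ++ flatF rest (rowA r pv).2 := by
  induction r generalizing pv with
  | nil => simp [rowA]
  | cons e es ih => simp [flatF, rowA, ih]

theorem rowA_fst_length (r : List (List Int)) (pv : Int) :
    (rowA r pv).1.length = r.length := by
  induction r generalizing pv with
  | nil => rfl
  | cons e es ih => simp [rowA, ih]

theorem chunkRows_flatF (rows : List (List (List Int))) (pv : Int) :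
    chunkRows rows (flatF (rows.flatMap (fun row => row)) pv) = loopA rows pv := by
  induction rows generalizing pv with
  | nil => rfl
  | cons r rs ih =>
    simp only [List.flatMap_cons, chunkRows, loopA, flatF_append]
    rw [show r.length = (rowA r pv).1.length from (rowA_fst_length r pv).symm,
      List.take_left, List.drop_left, ih]

-- ===== VERDICT (by name: the statement is the Claim_ definition above) =====
theorem get_GM_input_spec : Claim_equal_get_GM_input := by
  intro mp _ _
  unfold Spec_get_GM_input get_GM_input get_GM_input_alt
  simp only []
  rw [zipmap_eq_flatF, chunkRows_flatF]
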